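-- pv_equiv track=rewrite | github.com/moon23k/Dialog_Character | setup_himym.py | split_dialog
-- ===== SOURCE A (Python) =====
-- def split_dialog(script, char='barney'):
--     dialog = []
--     prior_char, prior_uttr = '', ''
--
--     for dial in script:
--         for line in dial['dialogue']:
--             curr_char = line.split(':')[0].lower().strip()
--             curr_uttr = ''.join(line.split(':')[1:]).strip()
--
--             if not prior_char:
--                 if curr_char == char:
--                     continue
--
--                 prior_char = curr_char
--                 prior_uttr = curr_uttr
--                 continue
--
--             if prior_char != char and curr_char == char:
--                 temp = dict()
--                 temp['uttr'] = prior_uttr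
--                 temp['resp'] = curr_uttr
--
--                 dialog.append(temp)
--
--             prior_char = curr_char
--             prior_uttr = curr_uttr
--
--     return dialog
-- ===== SOURCE B (Python) =====
-- def split_dialog(script, char='barney'):
--     # Phase 1: flatten all dialogue lines and parse each into (speaker, utterance).
--     parsed = []
--     for dial in script:
--         for line in dial['dialogue']:
--             parts = line.split(':')
--             parsed.append((parts[0].lower().strip(), ''.join(parts[1:]).strip()))
--     # Phase 2: emit adjacent pairs where the response line is the target character.
--     return [{'uttr': pu, 'resp': cu}
--             for (pc, pu), (cc, cu) in zip(parsed, parsed[1:])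
--             if pc != '' and pc != char and cc == char]
-- ===== Notes on version B (the rewrite author's own statement) =====
-- stated objective: simpler
-- what changed: Replaces A's stateful prior-speaker/reset loop with a two-phase decomposition: flatten-and-parse every line into (speaker, utterance) tuples, then a single comprehension over adjacent pairs with the guard pc != '' and pc != char and cc == char, which subsumes A's sentinel/reset bookkeeping.
import Mathlib
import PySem

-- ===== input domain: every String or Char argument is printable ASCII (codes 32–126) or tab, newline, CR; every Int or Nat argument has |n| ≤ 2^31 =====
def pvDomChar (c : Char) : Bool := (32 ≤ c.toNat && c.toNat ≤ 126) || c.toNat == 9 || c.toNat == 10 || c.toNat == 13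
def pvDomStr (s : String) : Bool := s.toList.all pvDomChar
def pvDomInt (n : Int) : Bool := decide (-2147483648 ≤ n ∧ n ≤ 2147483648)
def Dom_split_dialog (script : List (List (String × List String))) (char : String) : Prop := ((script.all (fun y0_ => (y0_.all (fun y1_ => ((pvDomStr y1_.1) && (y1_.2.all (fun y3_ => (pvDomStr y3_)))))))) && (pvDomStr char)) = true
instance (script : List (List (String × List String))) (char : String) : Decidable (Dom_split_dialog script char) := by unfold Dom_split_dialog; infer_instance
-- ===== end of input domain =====

-- B replaces A's stateful prior-speaker/reset loop by parse-all-lines then scan adjacent pairs (objective: simpler).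

-- ===== PORT A =====
-- Literal port of A: one fold over dials, inner fold over lines, state (dialog, prior_char, prior_uttr).
-- dial['dialogue'] is first-match lookup; the KeyError case (no "dialogue" key) is excluded by Pre_, so .getD [].
-- line.split(':') is never empty, so parts[0] is (…).headD "".
def split_dialog (script : List (List (String × List String))) (char : String) : List (List (String × String)) :=
  (script.foldl (fun st dial =>
      (((dial.lookup "dialogue").getD []).foldl (fun st line =>
        let currChar := PySem.Str.strip (PySem.Str.lower (((PySem.Str.split? line ":").getD []).headD ""))
        let currUttr := PySem.Str.strip (PySem.Str.join "" (((PySem.Str.split? line ":").getD []).drop 1))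
        if st.2.1 = "" then
          if currChar = char then st else (st.1, currChar, currUttr)
        else
          ((if st.2.1 ≠ char ∧ currChar = char then st.1 ++ [[("uttr", st.2.2), ("resp", currUttr)]] else st.1),
           currChar, currUttr)) st))
    (([], "", "") : List (List (String × String)) × String × String)).1

-- ===== PORT B =====
-- parse one line into (speaker, utterance), as Source B's phase 1 does per line
def pvParse (line : String) : String × String :=
  (PySem.Str.strip (PySem.Str.lower (((PySem.Str.split? line ":").getD []).headD "")),
   PySem.Str.strip (PySem.Str.join "" (((PySem.Str.split? line ":").getD []).drop 1)))

def split_dialog_alt (script : List (List (String × List String))) (char : String) : List (List (String × String)) :=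
  let parsed := (script.flatMap (fun dial => (dial.lookup "dialogue").getD [])).map pvParse
  (parsed.zip parsed.tail).filterMap (fun pq =>
    if pq.1.1 ≠ "" ∧ pq.1.1 ≠ char ∧ pq.2.1 = char
    then some [("uttr", pq.1.2), ("resp", pq.2.2)] else none)

-- ===== PRECONDITION & SPEC =====
-- Pre_ excludes exactly the dials without a "dialogue" key, on which Python A raises KeyError.
def Pre_split_dialog (script : List (List (String × List String))) (_char : String) : Prop :=
  ∀ dial ∈ script, (dial.lookup "dialogue").isSome = true
instance (script : List (List (String × List String))) (char : String) : Decidable (Pre_split_dialog script char) := by unfold Pre_split_dialog; infer_instance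
def pvWitness_split_dialog : (List (List (String × List String))) × String :=
  ([[("dialogue", ["Ted: hi there", "Barney: suit up!"])]], "barney")

def Spec_split_dialog (script : List (List (String × List String))) (char : String) (out : List (List (String × String))) : Prop := out = split_dialog_alt script char
instance (script : List (List (String × List String))) (char : String) (out : List (List (String × String))) : Decidable (Spec_split_dialog script char out) := by unfold Spec_split_dialog; infer_instance

-- ===== CLAIM (what is proved, stated in full; the proofs are below) =====
def Claim_equal_split_dialog : Prop := ∀ (script : List (List (String × List String))) (char : String), Dom_split_dialog script char → Pre_split_dialog script char → Spec_split_dialog script char (split_dialog script char)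

-- ===== LEMMAS AND PROOFS =====

-- A's loop body, expressed on an already-parsed (speaker, utterance) pair
def pvStep (char : String)
    (st : List (List (String × String)) × String × String) (p : String × String) :
    List (List (String × String)) × String × String :=
  if st.2.1 = "" then
    if p.1 = char then st else (st.1, p.1, p.2)
  else
    ((if st.2.1 ≠ char ∧ p.1 = char then st.1 ++ [[("uttr", st.2.2), ("resp", p.2)]] else st.1),
     p.1, p.2)

-- B's phase 2 on a parsed list
def pvEmit (char : String) (l : List (String × String)) : List (List (String × String)) :=
  (l.zip l.tail).filterMap (fun pq =>
    if pq.1.1 ≠ "" ∧ pq.1.1 ≠ char ∧ pq.2.1 = char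
    then some [("uttr", pq.1.2), ("resp", pq.2.2)] else none)

theorem pvEmit_cons_cons (char : String) (x y : String × String) (xs : List (String × String)) :
    pvEmit char (x :: y :: xs) =
      (if x.1 ≠ "" ∧ x.1 ≠ char ∧ y.1 = char
       then [[("uttr", x.2), ("resp", y.2)]] else []) ++ pvEmit char (y :: xs) := by
  unfold pvEmit
  rw [show (x :: y :: xs).tail = y :: xs from rfl, show (y :: xs).tail = xs from rfl,
    List.zip_cons_cons, List.filterMap_cons]
  by_cases h : x.1 ≠ "" ∧ x.1 ≠ char ∧ y.1 = char <;> simp [h]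

theorem pvEmit_cons_skip (char : String) (x : String × String) (xs : List (String × String))
    (h : x.1 = "" ∨ x.1 = char) : pvEmit char (x :: xs) = pvEmit char xs := by
  cases xs with
  | nil => rfl
  | cons y t =>
    rw [pvEmit_cons_cons, if_neg, List.nil_append]
    rcases h with h | h <;> rintro ⟨h1, h2, -⟩ <;> [exact h1 h; exact h2 h]

-- the loop invariant: A's state machine started in the reset state (the '' sentinel)
-- computes pvEmit, and started from a genuine prior line (pc, pu) it computes pvEmit of (pc, pu) :: rest
theorem pvLoop_emit (char : String) (l : List (String × String)) :
    (∀ pu acc, (l.foldl (pvStep char) (acc, "", pu)).1 = acc ++ pvEmit char l) ∧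
    (∀ pc pu acc, pc ≠ "" →
      (l.foldl (pvStep char) (acc, pc, pu)).1 = acc ++ pvEmit char ((pc, pu) :: l)) := by
  induction l with
  | nil =>
    refine ⟨fun pu acc => by simp [pvEmit], fun pc pu acc h => by simp [pvEmit]⟩
  | cons x xs ih =>
    constructor
    · intro pu acc
      rw [List.foldl_cons]
      by_cases hc : x.1 = char
      · rw [show pvStep char (acc, "", pu) x = (acc, "", pu) by simp [pvStep, hc],
          pvEmit_cons_skip char x xs (Or.inr hc)]
        exact ih.1 pu acc
      · rw [show pvStep char (acc, "", pu) x = (acc, x.1, x.2) by simp [pvStep, hc]]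
        by_cases he : x.1 = ""
        · rw [pvEmit_cons_skip char x xs (Or.inl he), he]
          exact ih.1 x.2 acc
        · exact ih.2 x.1 x.2 acc he
    · intro pc pu acc hpc
      rw [List.foldl_cons]
      have hstep : pvStep char (acc, pc, pu) x =
          ((if pc ≠ char ∧ x.1 = char then acc ++ [[("uttr", pu), ("resp", x.2)]] else acc),
           x.1, x.2) := by
        simp [pvStep, hpc]
      rw [hstep, pvEmit_cons_cons char (pc, pu) x xs]
      have hguard : (if pc ≠ char ∧ x.1 = char then acc ++ [[("uttr", pu), ("resp", x.2)]] else acc)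
          = acc ++ (if (pc, pu).1 ≠ "" ∧ (pc, pu).1 ≠ char ∧ x.1 = char
                    then [[("uttr", (pc, pu).2), ("resp", x.2)]] else []) := by
        by_cases h : pc ≠ char ∧ x.1 = char
        · rw [if_pos h, if_pos ⟨hpc, h⟩]
        · rw [if_neg h, if_neg (fun h' => h ⟨h'.2.1, h'.2.2⟩), List.append_nil]
      by_cases he : x.1 = ""
      · rw [show ((if pc ≠ char ∧ x.1 = char then acc ++ [[("uttr", pu), ("resp", x.2)]] else acc),
              x.1, x.2) = ((if pc ≠ char ∧ x.1 = char then acc ++ [[("uttr", pu), ("resp", x.2)]] else acc),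
              "", x.2) by rw [he],
            ih.1 x.2, pvEmit_cons_skip char x xs (Or.inl he), hguard, List.append_assoc]
      · rw [ih.2 x.1 x.2 _ he, hguard, List.append_assoc]

-- split_dialog, rephrased: fold pvStep over the flattened, parsed line list
theorem split_dialog_eq_foldl (script : List (List (String × List String))) (char : String) :
    split_dialog script char =
      (((script.flatMap (fun dial => (dial.lookup "dialogue").getD [])).map pvParse).foldl
        (pvStep char) ([], "", "")).1 := by
  unfold split_dialog
  rw [← List.foldl_flatMap, List.foldl_map]
  rfl

theorem split_dialog_spec : Claim_equal_split_dialog := by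
  intro script char _ _
  unfold Spec_split_dialog split_dialog_alt
  rw [split_dialog_eq_foldl]
  exact (pvLoop_emit char _).1 "" []
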